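-- pv_equiv track=rewrite | github.com/wsgan001/repeated_pattern_discovery | orig_algorithms.py | compute_x
-- ===== SOURCE A (Python) =====
-- def compute_x(d, v):
--     """ Computes the set X as defined in [Meredith2002] Fig. 20. """
--
--     i = 0
--     x = []
--
--     while i < len(v):
--         q = []
--         j = i + 1
--
--         while j < len(v) and v[j][0] == v[i][0]:
--             q.append(d[v[j][1]] - d[v[j - 1][1]])
--             j += 1
--
--         x.append((i, q))
--         i = j
--
--     return x
-- ===== SOURCE B (Python) =====
-- def compute_x(d, v):
--     """ Computes the set X as defined in [Meredith2002] Fig. 20. """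
--     n = len(v)
--     # pass 1: group boundaries (run starts), plus len(v) as a final sentinel
--     bounds = [i for i in range(n) if i == 0 or v[i][0] != v[i - 1][0]]
--     bounds.append(n)
--     # pass 2: successive differences within each group
--     x = []
--     for k in range(len(bounds) - 1):
--         lo, hi = bounds[k], bounds[k + 1]
--         x.append((lo, [d[v[j][1]] - d[v[j - 1][1]] for j in range(lo + 1, hi)]))
--     return x
-- ===== Notes on version B (the rewrite author's own statement) =====
-- stated objective: alternative
-- what changed: B replaces A's interleaved nested while-loops with two separate passes: it first materializes the list of group-boundary indices (plus a len(v) sentinel), then maps over consecutive boundary pairs computing the in-group successive differences with a comprehension.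
import Mathlib
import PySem

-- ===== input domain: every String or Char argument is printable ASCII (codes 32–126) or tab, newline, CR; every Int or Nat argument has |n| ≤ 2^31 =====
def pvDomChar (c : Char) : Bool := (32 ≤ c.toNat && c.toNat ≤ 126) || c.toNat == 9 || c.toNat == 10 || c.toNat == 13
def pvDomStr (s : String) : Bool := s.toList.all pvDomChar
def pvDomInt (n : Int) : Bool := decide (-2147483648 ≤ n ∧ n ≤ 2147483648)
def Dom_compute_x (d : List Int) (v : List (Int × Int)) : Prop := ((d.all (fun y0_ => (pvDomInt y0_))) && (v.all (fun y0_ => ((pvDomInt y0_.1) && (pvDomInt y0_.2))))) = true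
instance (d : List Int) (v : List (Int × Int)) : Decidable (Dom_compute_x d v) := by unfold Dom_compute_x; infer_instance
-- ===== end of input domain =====

-- B separates boundary detection from difference computation: one pass builds the
-- group-boundary index table, a second pass maps over consecutive boundary pairs (alternative decomposition, same cost).

-- ===== PORT A =====
-- inner while loop: while j < len(v) and v[j][0] == v[i][0]: q.append(d[v[j][1]] - d[v[j-1][1]]); j += 1
def innerA (d : List Int) (v : List (Int × Int)) (key : Int) (j : Nat) (q : List Int) : Nat × List Int :=
  if h : j < v.length ∧ (v[j]?.getD (0,0)).1 = key then
    innerA d v key (j+1)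
      (q ++ [(PySem.List.pyGet? d (v[j]?.getD (0,0)).2).getD 0 -
             (PySem.List.pyGet? d (v[j-1]?.getD (0,0)).2).getD 0])
  else (j, q)
termination_by v.length - j
decreasing_by omega

theorem innerA_fst_ge (d : List Int) (v : List (Int × Int)) (key : Int) (j : Nat) (q : List Int) :
    j ≤ (innerA d v key j q).1 := by
  fun_induction innerA with
  | case1 j q h ih => omega
  | case2 j q h => simp

-- outer while loop: while i < len(v)
def outerA (d : List Int) (v : List (Int × Int)) (i : Nat) : List (Int × List Int) :=
  if h : i < v.length then
    let r := innerA d v (v[i]?.getD (0,0)).1 (i+1) []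
    ((i : Int), r.2) :: outerA d v r.1
  else []
termination_by v.length - i
decreasing_by
  have := innerA_fst_ge d v (v[i]?.getD (0,0)).1 (i+1) []
  omega

def compute_x (d : List Int) (v : List (Int × Int)) : List (Int × List Int) :=
  outerA d v 0

-- ===== PORT B =====
def compute_x_alt (d : List Int) (v : List (Int × Int)) : List (Int × List Int) :=
  let n := v.length
  -- pass 1: bounds = [i for i in range(n) if i == 0 or v[i][0] != v[i-1][0]]; bounds.append(n)
  let bounds := ((List.range n).filter
      (fun i => (i == 0) || !((v[i]?.getD (0,0)).1 == (v[i-1]?.getD (0,0)).1))) ++ [n]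
  -- pass 2: for k in range(len(bounds)-1): lo, hi = bounds[k], bounds[k+1]; append (lo, [...])
  (List.range (bounds.length - 1)).map (fun k =>
    let lo : Nat := bounds[k]?.getD 0
    let hi : Nat := bounds[k+1]?.getD 0
    ((lo : Int), (List.range' (lo+1) (hi - (lo+1))).map (fun j =>
      (PySem.List.pyGet? d (v[j]?.getD (0,0)).2).getD 0 -
      (PySem.List.pyGet? d (v[j-1]?.getD (0,0)).2).getD 0)))

-- ===== PRECONDITION & SPEC =====
-- Pre_ excludes exactly the inputs on which Python A raises IndexError: d is indexed
-- at v[j][1] and v[j-1][1] precisely at the positions j continuing a run of equal keys.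
def Pre_compute_x (d : List Int) (v : List (Int × Int)) : Prop :=
  ∀ j, j < v.length → 1 ≤ j → (v[j]?.getD (0,0)).1 = (v[j-1]?.getD (0,0)).1 →
    PySem.Raise.InRange d.length (v[j]?.getD (0,0)).2 ∧
    PySem.Raise.InRange d.length (v[j-1]?.getD (0,0)).2
instance (d : List Int) (v : List (Int × Int)) : Decidable (Pre_compute_x d v) := by
  unfold Pre_compute_x; infer_instance

def pvWitness_compute_x : List Int × (List (Int × Int)) := ([5, 7], [(1, 0), (1, 1), (2, 0)])

def Spec_compute_x (d : List Int) (v : List (Int × Int)) (out : List (Int × List Int)) : Prop := out = compute_x_alt d v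
instance (d : List Int) (v : List (Int × Int)) (out : List (Int × List Int)) : Decidable (Spec_compute_x d v out) := by unfold Spec_compute_x; infer_instance

-- ===== CLAIM (what is proved, stated in full; the proofs are below) =====
def Claim_equal_compute_x : Prop := ∀ (d : List Int) (v : List (Int × Int)), Dom_compute_x d v → Pre_compute_x d v → Spec_compute_x d v (compute_x d v)

-- ===== LEMMAS AND PROOFS =====

-- the per-position difference d[v[j][1]] - d[v[j-1][1]]
def dif (d : List Int) (v : List (Int × Int)) (j : Nat) : Int :=
  (PySem.List.pyGet? d (v[j]?.getD (0,0)).2).getD 0 -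
  (PySem.List.pyGet? d (v[j-1]?.getD (0,0)).2).getD 0

-- boundary predicate of B's pass 1
def pb (v : List (Int × Int)) (i : Nat) : Bool :=
  (i == 0) || !((v[i]?.getD (0,0)).1 == (v[i-1]?.getD (0,0)).1)

-- next run break at or after j (for j ≥ 1)
def brk (v : List (Int × Int)) (j : Nat) : Nat :=
  if h : j < v.length ∧ (v[j]?.getD (0,0)).1 = (v[j-1]?.getD (0,0)).1 then brk v (j+1) else j
termination_by v.length - j
decreasing_by omega

theorem brk_ge (v : List (Int × Int)) (j : Nat) : j ≤ brk v j := by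
  fun_induction brk with
  | case1 j h ih => omega
  | case2 j h => omega

theorem brk_le (v : List (Int × Int)) (j : Nat) (hj : j ≤ v.length) : brk v j ≤ v.length := by
  fun_induction brk with
  | case1 j h ih => exact ih (by omega)
  | case2 j h => omega

theorem brk_break (v : List (Int × Int)) (j : Nat) (hb : brk v j < v.length) :
    ¬ ((v[brk v j]?.getD (0,0)).1 = (v[brk v j - 1]?.getD (0,0)).1) := by
  fun_induction brk with
  | case1 j h ih => exact ih hb
  | case2 j h => intro he; exact h ⟨hb, he⟩

theorem brk_mid (v : List (Int × Int)) (j t : Nat) (h1 : j ≤ t) (h2 : t < brk v j) :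
    (v[t]?.getD (0,0)).1 = (v[t-1]?.getD (0,0)).1 := by
  fun_induction brk with
  | case1 j h ih =>
      rcases Nat.eq_or_lt_of_le h1 with rfl | hlt
      · exact h.2
      · exact ih (by omega) h2
  | case2 j h => omega

theorem innerA_eq (d : List Int) (v : List (Int × Int)) (key : Int) (j : Nat) (q : List Int)
    (hj : j ≤ v.length) (hk : j < v.length → (v[j-1]?.getD (0,0)).1 = key) :
    innerA d v key j q = (brk v j, q ++ (List.range' j (brk v j - j)).map (dif d v)) := by
  induction hm : v.length - j using Nat.strong_induction_on generalizing j q with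
  | _ m ih =>
  by_cases hc : j < v.length ∧ (v[j]?.getD (0,0)).1 = key
  · have hkey : (v[j-1]?.getD (0,0)).1 = key := hk hc.1
    have hbc : j < v.length ∧ (v[j]?.getD (0,0)).1 = (v[j-1]?.getD (0,0)).1 :=
      ⟨hc.1, by rw [hc.2, hkey]⟩
    have hbrk : brk v j = brk v (j+1) := by rw [brk, dif_pos hbc]
    have hge : j + 1 ≤ brk v (j+1) := brk_ge v (j+1)
    rw [innerA, dif_pos hc]
    rw [ih (v.length - (j+1)) (by omega) (j+1) _ (by omega)
      (fun h1 => by simp [hc.2]) rfl]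
    rw [hbrk]
    congr 1
    have : brk v (j+1) - j = (brk v (j+1) - (j+1)) + 1 := by omega
    rw [this, List.range'_succ, List.map_cons, List.append_assoc]
    rfl
  · have hbrk : brk v j = j := by
      rw [brk]
      have : ¬ (j < v.length ∧ (v[j]?.getD (0,0)).1 = (v[j-1]?.getD (0,0)).1) := by
        intro hbc
        exact hc ⟨hbc.1, by rw [hbc.2, hk hbc.1]⟩
      rw [dif_neg this]
    rw [innerA, dif_neg hc]
    simp [hbrk]

theorem bFrom_cons (v : List (Int × Int)) (i : Nat) (hi : i < v.length) (hp : pb v i = true) :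
    (List.range' i (v.length - i)).filter (pb v)
      = i :: (List.range' (brk v (i+1)) (v.length - brk v (i+1))).filter (pb v) := by
  have hb1 : i + 1 ≤ brk v (i+1) := brk_ge v (i+1)
  have hb2 : brk v (i+1) ≤ v.length := brk_le v (i+1) (by omega)
  set b := brk v (i+1) with hbdef
  have h1 : v.length - i = (v.length - (i+1)) + 1 := by omega
  rw [h1, List.range'_succ, List.filter_cons, hp]
  have h2 : v.length - (i+1) = (b - (i+1)) + (v.length - b) := by omega
  rw [h2, ← List.range'_append, List.filter_append]
  have h3 : (List.range' (i+1) (b - (i+1))).filter (pb v) = [] := by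
    rw [List.filter_eq_nil_iff]
    intro t ht
    rw [List.mem_range'_1] at ht
    have hmid := brk_mid v (i+1) t ht.1 (by omega)
    simp [pb, hmid]
    omega
  rw [h3]
  simp [show i + 1 + (b - (i+1)) = b by omega]

-- adjacent-pairs view of B's second pass
def adjMap (d : List Int) (v : List (Int × Int)) : List Nat → List (Int × List Int)
  | a :: b :: t => ((a : Int), (List.range' (a+1) (b - (a+1))).map (dif d v)) :: adjMap d v (b :: t)
  | _ => []

theorem adjIdx (d : List Int) (v : List (Int × Int)) (bs : List Nat) :
    (List.range (bs.length - 1)).map (fun k =>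
      let lo : Nat := bs[k]?.getD 0
      let hi : Nat := bs[k+1]?.getD 0
      ((lo : Int), (List.range' (lo+1) (hi - (lo+1))).map (dif d v)))
      = adjMap d v bs := by
  induction bs with
  | nil => simp [adjMap]
  | cons a bs ih =>
    cases bs with
    | nil => simp [adjMap]
    | cons b t =>
      rw [adjMap]
      rw [← ih]
      simp only [List.length_cons, Nat.add_sub_cancel, List.range_succ_eq_map, List.map_cons,
        List.map_map]
      rfl

theorem main_eq (d : List Int) (v : List (Int × Int)) (i : Nat) (hi : i ≤ v.length)
    (hp : i < v.length → pb v i = true) :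
    adjMap d v (((List.range' i (v.length - i)).filter (pb v)) ++ [v.length]) = outerA d v i := by
  induction hm : v.length - i using Nat.strong_induction_on generalizing i with
  | _ m ih =>
  subst hm
  by_cases hlt : i < v.length
  · have hpi := hp hlt
    have hb1 : i + 1 ≤ brk v (i+1) := brk_ge v (i+1)
    have hb2 : brk v (i+1) ≤ v.length := brk_le v (i+1) (by omega)
    set b := brk v (i+1) with hbdef
    rw [bFrom_cons v i hlt hpi]
    rw [outerA, dif_pos hlt]
    have hinner := innerA_eq d v (v[i]?.getD (0,0)).1 (i+1) [] (by omega)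
      (fun _ => by simp)
    rw [hinner]
    simp only [List.nil_append, ← hbdef]
    have hpbb : b < v.length → pb v b = true := by
      intro hbl
      have hne := brk_break v (i+1) (hbdef ▸ hbl)
      rw [← hbdef] at hne
      simp [pb, hne]
    have hrec : adjMap d v (((List.range' b (v.length - b)).filter (pb v)) ++ [v.length])
        = outerA d v b :=
      ih (v.length - b) (by omega) b (by omega) hpbb rfl
    by_cases hbl : b < v.length
    · rw [bFrom_cons v b hbl (hpbb hbl)] at hrec ⊢
      simp only [List.cons_append] at hrec ⊢
      rw [adjMap, hrec]
    · have hbl' : b = v.length := by omega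
      have h0 : (List.range' b (v.length - b)).filter (pb v) = [] := by
        rw [hbl']; simp
      rw [h0] at hrec ⊢
      simp only [List.nil_append] at hrec
      rw [List.cons_append, List.nil_append, adjMap, ← hrec, hbl']
  · have hi' : i = v.length := by omega
    subst hi'
    rw [outerA, dif_neg hlt]
    have : (List.range' v.length (v.length - v.length)).filter (pb v) = [] := by simp
    rw [this, List.nil_append]
    rfl

-- ===== VERDICT (by name: the statement is the Claim_ definition above) =====
theorem compute_x_spec : Claim_equal_compute_x := by
  intro d v _ _
  unfold Spec_compute_x compute_x compute_x_alt
  rw [← main_eq d v 0 (by omega) (fun _ => rfl)]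
  have h := adjIdx d v (((List.range v.length).filter
      (fun i => (i == 0) || !((v[i]?.getD (0,0)).1 == (v[i-1]?.getD (0,0)).1))) ++ [v.length])
  have hL : adjMap d v (((List.range' 0 (v.length - 0)).filter (pb v)) ++ [v.length])
      = adjMap d v (((List.range v.length).filter
        (fun i => (i == 0) || !((v[i]?.getD (0,0)).1 == (v[i-1]?.getD (0,0)).1))) ++ [v.length]) := by
    rw [Nat.sub_zero, ← List.range_eq_range']
    rfl
  exact hL.trans h.symm
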